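-- pv_equiv track=rewrite | github.com/Ren-97/CodePath2025Summer | Unit 10/section2_advanced1.py | min_reorient_flight_routes
-- ===== SOURCE A (Python) =====
-- def min_reorient_flight_routes(n, connections):
--     start_from_0 = 0
--     n = len(connections)
--     q = []
--     for i in range(n):
--         if connections[i][0] == 0:
--             q.append(connections[i][1])
--             start_from_0 += 1
--     while q:
--         new_q = []
--         for i in range(n):
--             if connections[i][0] in q:
--                 new_q.append(connections[i][1])
--                 start_from_0 += 1
--         q = new_q
--     return n - start_from_0
-- ===== SOURCE B (Python) =====
-- def min_reorient_flight_routes(n, connections):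
--     # Build an adjacency index once: source -> list of its connections.
--     adj = {}
--     for c in connections:
--         adj.setdefault(c[0], []).append(c)
--     start = 0
--     frontier = {0}
--     while True:
--         matched = 0
--         nxt = set()
--         for s in frontier:
--             for c in adj.get(s, []):
--                 matched += 1
--                 nxt.add(c[1])
--         if matched == 0:
--             break
--         start += matched
--         frontier = nxt
--     return len(connections) - start
-- ===== Notes on version B (the rewrite author's own statement) =====
-- stated objective: alternative
-- what changed: B builds an adjacency dict (source -> its connections) once and expands a set frontier by direct lookup, instead of A's rescanning every connection each round with a linear 'in q' list-membership test.
import Mathlib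
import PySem

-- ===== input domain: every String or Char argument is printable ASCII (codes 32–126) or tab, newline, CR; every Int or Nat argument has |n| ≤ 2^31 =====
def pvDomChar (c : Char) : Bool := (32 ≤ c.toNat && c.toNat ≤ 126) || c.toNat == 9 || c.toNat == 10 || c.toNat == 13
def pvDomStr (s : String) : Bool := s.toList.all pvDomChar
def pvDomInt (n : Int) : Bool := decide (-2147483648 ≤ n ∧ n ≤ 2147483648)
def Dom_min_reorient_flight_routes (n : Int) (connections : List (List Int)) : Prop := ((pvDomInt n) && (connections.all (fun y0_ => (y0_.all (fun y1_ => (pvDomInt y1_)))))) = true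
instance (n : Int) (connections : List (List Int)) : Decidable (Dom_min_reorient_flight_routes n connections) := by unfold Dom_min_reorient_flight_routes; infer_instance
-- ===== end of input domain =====

-- ===== PORT A =====
-- B replaces A's per-round rescan of all connections (with a linear 'in q' list-membership
-- test) by a one-time adjacency dict and a set frontier expanded by direct lookup.

-- c[0] and c[1]
def eSrc (c : List Int) : Int := PySem.List.pyGetD c 0 0
def eDst (c : List Int) : Int := PySem.List.pyGetD c 1 0

-- A's 'while q:' loop, with fuel (under Pre_ the loop empties well inside the fuel)
def aLoop (conns : List (List Int)) : Nat → List Int → Int → Int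
  | 0, _, cnt => cnt
  | f+1, q, cnt =>
    if q.isEmpty then cnt
    else
      let st := conns.foldl (fun (st : List Int × Int) c =>
          if q.contains (eSrc c) then (st.1 ++ [eDst c], st.2 + 1) else st) ([], cnt)
      aLoop conns f st.1 st.2

def min_reorient_flight_routes (n : Int) (connections : List (List Int)) : Int :=
  let st := connections.foldl (fun (st : List Int × Int) c =>
      if eSrc c == 0 then (st.1 ++ [eDst c], st.2 + 1) else st) ([], 0)
  (connections.length : Int) - aLoop connections (2 * connections.length + 2) st.1 st.2

-- ===== PORT B =====
-- adj.setdefault(c[0], []).append(c)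
def bBuild (conns : List (List Int)) : PySem.Dict Int (List (List Int)) :=
  conns.foldl (fun d c => d.modify (eSrc c) [] (· ++ [c])) PySem.Dict.empty

-- B's 'while True:' loop, with fuel (same termination behaviour as A's loop)
def bLoop (adj : PySem.Dict Int (List (List Int))) : Nat → PySem.Set Int → Int → Int
  | 0, _, start => start
  | f+1, frontier, start =>
    let st := frontier.foldl (fun (st : Int × PySem.Set Int) s =>
        (adj.getD s []).foldl (fun (st : Int × PySem.Set Int) c =>
          (st.1 + 1, PySem.Set.add st.2 (eDst c))) st)
      (0, PySem.Set.empty)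
    if st.1 == 0 then start else bLoop adj f st.2 (start + st.1)

def min_reorient_flight_routes_alt (n : Int) (connections : List (List Int)) : Int :=
  let adj := bBuild connections
  (connections.length : Int) -
    bLoop adj (2 * connections.length + 3) (PySem.Set.add PySem.Set.empty 0) 0

-- ===== PRECONDITION & SPEC =====
-- The BFS level sets of A's traversal: pvFronts k = nodes at the end of a length-k edge path from 0
def pvStep (conns : List (List Int)) (F : List Int) : List Int :=
  PySem.Set.ofList ((conns.filter (fun c => F.contains (eSrc c))).map eDst)

def pvFronts (conns : List (List Int)) (k : Nat) : List Int :=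
  (pvStep conns)^[k] [0]

-- Pre_ = exactly the inputs on which Python A returns: every connection is nonempty (else
-- IndexError on c[0]); a length-1 connection's source is never reached from 0 (else IndexError
-- on c[1]); and the level sets empty out (else the while loop runs forever; 2*len+2 levels
-- suffice, since a longer path from 0 must repeat a node, i.e. reach a cycle).
def Pre_min_reorient_flight_routes (n : Int) (connections : List (List Int)) : Prop :=
  (∀ c ∈ connections, c ≠ []) ∧
  (∀ c ∈ connections, 2 ≤ c.length ∨
    ∀ k ≤ 2 * connections.length + 2, eSrc c ∉ pvFronts connections k) ∧
  pvFronts connections (2 * connections.length + 2) = []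

instance (n : Int) (connections : List (List Int)) : Decidable (Pre_min_reorient_flight_routes n connections) := by unfold Pre_min_reorient_flight_routes; infer_instance

def pvWitness_min_reorient_flight_routes : Int × List (List Int) := (4, [[0, 1], [1, 2], [5, 7]])

def Spec_min_reorient_flight_routes (n : Int) (connections : List (List Int)) (out : Int) : Prop := out = min_reorient_flight_routes_alt n connections
instance (n : Int) (connections : List (List Int)) (out : Int) : Decidable (Spec_min_reorient_flight_routes n connections out) := by unfold Spec_min_reorient_flight_routes; infer_instance

-- ===== CLAIM (what is proved, stated in full; the proofs are below) =====
def Claim_equal_min_reorient_flight_routes : Prop := ∀ (n : Int) (connections : List (List Int)), Dom_min_reorient_flight_routes n connections → Pre_min_reorient_flight_routes n connections → Spec_min_reorient_flight_routes n connections (min_reorient_flight_routes n connections)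

-- ===== LEMMAS AND PROOFS =====

theorem witness_ok : Dom_min_reorient_flight_routes pvWitness_min_reorient_flight_routes.1 pvWitness_min_reorient_flight_routes.2 ∧ Pre_min_reorient_flight_routes pvWitness_min_reorient_flight_routes.1 pvWitness_min_reorient_flight_routes.2 := by
  constructor
  · decide
  · unfold Pre_min_reorient_flight_routes; decide

-- B's adjacency dict looked up: all connections with the given source, in order
theorem bBuild_getD (conns : List (List Int)) (s : Int) :
    (bBuild conns).getD s [] = conns.filter (fun c => eSrc c == s) := by
  have h : bBuild conns
      = (conns.map (fun c => (eSrc c, c))).foldl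
          (fun d p => d.modify p.1 [] (· ++ [p.2])) PySem.Dict.empty := by
    rw [List.foldl_map]
    rfl
  rw [h, PySem.Dict.getD_foldl_modify_append]
  simp [List.filter_map, Function.comp_def]

-- A's scan of all connections, split into list part and counter part
theorem aScan (P : List Int → Bool) (conns : List (List Int)) (acc : List Int × Int) :
    conns.foldl (fun (st : List Int × Int) c =>
        if P c then (st.1 ++ [eDst c], st.2 + 1) else st) acc
      = (acc.1 ++ (conns.filter P).map eDst, acc.2 + (conns.countP P : Int)) := by
  induction conns generalizing acc with
  | nil => simp
  | cons c t ih =>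
    by_cases h : P c = true
    · simp [h, ih]
      omega
    · simp [h, ih]

-- B's inner loop over one adjacency list
theorem bInner (l : List (List Int)) (st : Int × PySem.Set Int) :
    l.foldl (fun (st : Int × PySem.Set Int) c =>
        (st.1 + 1, PySem.Set.add st.2 (eDst c))) st
      = (st.1 + (l.length : Int), l.foldl (fun S c => PySem.Set.add S (eDst c)) st.2) := by
  induction l generalizing st with
  | nil => simp
  | cons c t ih =>
    simp [ih]
    omega

-- B's outer loop, counter component
theorem bOuter_fst (adj : PySem.Dict Int (List (List Int))) (F : List Int) (st : Int × PySem.Set Int) :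
    (F.foldl (fun (st : Int × PySem.Set Int) s =>
        (adj.getD s []).foldl (fun (st : Int × PySem.Set Int) c =>
          (st.1 + 1, PySem.Set.add st.2 (eDst c))) st) st).1
      = st.1 + (F.map (fun s => ((adj.getD s []).length : Int))).sum := by
  induction F generalizing st with
  | nil => simp
  | cons s t ih =>
    rw [List.foldl_cons, bInner, ih]
    simp
    omega

-- B's outer loop, set component: membership
theorem bOuter_mem (adj : PySem.Dict Int (List (List Int))) (F : List Int) (st : Int × PySem.Set Int) (x : Int) :
    x ∈ (F.foldl (fun (st : Int × PySem.Set Int) s =>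
        (adj.getD s []).foldl (fun (st : Int × PySem.Set Int) c =>
          (st.1 + 1, PySem.Set.add st.2 (eDst c))) st) st).2
      ↔ x ∈ st.2 ∨ ∃ s ∈ F, ∃ c ∈ adj.getD s [], x = eDst c := by
  induction F generalizing st with
  | nil => simp
  | cons s t ih =>
    rw [List.foldl_cons, bInner, ih]
    simp [PySem.Set.mem_foldl_add]
    rw [or_assoc]

theorem nodup_foldl_add (l : List (List Int)) (S : PySem.Set Int) (h : S.Nodup) :
    (l.foldl (fun S c => PySem.Set.add S (eDst c)) S).Nodup := by
  induction l generalizing S with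
  | nil => exact h
  | cons c t ih => exact ih _ (PySem.Set.nodup_add _ _ h)

-- B's outer loop, set component: no duplicates
theorem bOuter_nodup (adj : PySem.Dict Int (List (List Int))) (F : List Int) (st : Int × PySem.Set Int) (h : st.2.Nodup) :
    (F.foldl (fun (st : Int × PySem.Set Int) s =>
        (adj.getD s []).foldl (fun (st : Int × PySem.Set Int) c =>
          (st.1 + 1, PySem.Set.add st.2 (eDst c))) st) st).2.Nodup := by
  induction F generalizing st with
  | nil => exact h
  | cons s t ih =>
    rw [List.foldl_cons, bInner]
    exact ih _ (nodup_foldl_add _ _ h)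

-- partition of a membership count over the distinct sources
theorem countP_split (conns : List (List Int)) (s : Int) (t : List Int) (h : s ∉ t) :
    conns.countP (fun c => (s :: t).contains (eSrc c))
      = conns.countP (fun c => eSrc c == s) + conns.countP (fun c => t.contains (eSrc c)) := by
  induction conns with
  | nil => simp
  | cons c r ih =>
    simp only [List.countP_cons, ih]
    by_cases hc : eSrc c = s
    · have hnt : t.contains (eSrc c) = false := by
        rw [hc]
        simpa using h
      simp [hc]
      split_ifs <;> omega
    · simp [hc]
      split_ifs <;> omega

theorem sum_counts (conns : List (List Int)) (F : List Int) (hF : F.Nodup) :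
    (F.map (fun s => ((conns.filter (fun c => eSrc c == s)).length : Int))).sum
      = (conns.countP (fun c => F.contains (eSrc c)) : Int) := by
  induction F with
  | nil => simp
  | cons s t ih =>
    have hs : s ∉ t := (List.nodup_cons.mp hF).1
    have ht := ih (List.nodup_cons.mp hF).2
    simp only [List.map_cons, List.sum_cons, ht, countP_split conns s t hs]
    rw [← List.countP_eq_length_filter]
    push_cast
    ring

-- A's loop does nothing on an empty queue
theorem aLoop_nil (conns : List (List Int)) (f : Nat) (cnt : Int) :
    aLoop conns f [] cnt = cnt := by
  cases f <;> simp [aLoop]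

-- the two loops agree whenever the queue and the frontier have the same members
theorem loop_eq (conns : List (List Int)) (f : Nat) (q F : List Int) (cnt : Int)
    (hmem : ∀ x, x ∈ q ↔ x ∈ F) (hF : F.Nodup) :
    aLoop conns f q cnt = bLoop (bBuild conns) f F cnt := by
  induction f generalizing q F cnt with
  | zero => rfl
  | succ f ih =>
    rw [aLoop, bLoop]
    by_cases hq : q = []
    · subst hq
      have hFnil : F = [] := by
        apply List.eq_nil_iff_forall_not_mem.mpr
        intro x hx
        simpa using (hmem x).mpr hx
      subst hFnil
      simp
    · have hcont : ∀ x, q.contains x = F.contains x := by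
        intro x
        by_cases h : x ∈ F
        · simp [h, (hmem x).mpr h]
        · have h' : x ∉ q := fun hx => h ((hmem x).mp hx)
          simp [h, h']
      have hA : conns.foldl (fun (st : List Int × Int) c =>
          if q.contains (eSrc c) then (st.1 ++ [eDst c], st.2 + 1) else st) ([], cnt)
          = ((conns.filter (fun c => F.contains (eSrc c))).map eDst,
             cnt + (conns.countP (fun c => F.contains (eSrc c)) : Int)) := by
        have hptw : (fun (st : List Int × Int) c =>
            if q.contains (eSrc c) then (st.1 ++ [eDst c], st.2 + 1) else st)
            = (fun (st : List Int × Int) c =>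
            if F.contains (eSrc c) then (st.1 ++ [eDst c], st.2 + 1) else st) := by
          funext st c
          rw [hcont (eSrc c)]
        rw [hptw, aScan]
        simp
      have hfst : (F.foldl (fun (st : Int × PySem.Set Int) s =>
          ((bBuild conns).getD s []).foldl (fun (st : Int × PySem.Set Int) c =>
            (st.1 + 1, PySem.Set.add st.2 (eDst c))) st) ((0 : Int), PySem.Set.empty)).1
          = (conns.countP (fun c => F.contains (eSrc c)) : Int) := by
        rw [bOuter_fst]
        simp only [bBuild_getD]
        rw [sum_counts conns F hF]
        simp
      simp only [List.isEmpty_iff, hq, if_false, hA]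
      by_cases hk : (conns.countP (fun c => F.contains (eSrc c)) : Int) = 0
      · have hk' : conns.countP (fun c => F.contains (eSrc c)) = 0 := by exact_mod_cast hk
        have hfil : conns.filter (fun c => F.contains (eSrc c)) = [] := by
          rw [List.filter_eq_nil_iff]
          exact fun a ha => by simpa using List.countP_eq_zero.mp hk' a ha
        rw [hfil, List.map_nil, aLoop_nil, hfst, hk]
        simp
      · have hbne : ((F.foldl (fun (st : Int × PySem.Set Int) s =>
            ((bBuild conns).getD s []).foldl (fun (st : Int × PySem.Set Int) c =>
              (st.1 + 1, PySem.Set.add st.2 (eDst c))) st) ((0 : Int), PySem.Set.empty)).1 == 0) = false := by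
          rw [hfst]
          simpa using hk
        rw [hbne]
        simp only [Bool.false_eq_true, if_false, hfst]
        apply ih
        · intro x
          rw [bOuter_mem]
          simp only [bBuild_getD]
          constructor
          · intro hx
            rcases List.mem_map.mp hx with ⟨c, hc, rfl⟩
            rcases List.mem_filter.mp hc with ⟨hcm, hcf⟩
            refine Or.inr ⟨eSrc c, ?_, c, ?_, rfl⟩
            · exact (List.contains_iff_mem).mp hcf
            · exact List.mem_filter.mpr ⟨hcm, by simp⟩
          · rintro (hx | ⟨s, hs, c, hc, rfl⟩)
            · simp at hx
            · rcases List.mem_filter.mp hc with ⟨hcm, hcs⟩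
              refine List.mem_map.mpr ⟨c, List.mem_filter.mpr ⟨hcm, ?_⟩, rfl⟩
              have : eSrc c = s := by simpa using hcs
              rw [List.contains_iff_mem, this]
              simpa using hs
        · exact bOuter_nodup _ _ _ List.nodup_nil

-- A's loop, one step on a nonempty queue
theorem aLoop_succ_ne (conns : List (List Int)) (f : Nat) (q : List Int) (cnt : Int) (hq : q ≠ []) :
    aLoop conns (f+1) q cnt
      = aLoop conns f
          (conns.foldl (fun (st : List Int × Int) c =>
            if q.contains (eSrc c) then (st.1 ++ [eDst c], st.2 + 1) else st) ([], cnt)).1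
          (conns.foldl (fun (st : List Int × Int) c =>
            if q.contains (eSrc c) then (st.1 ++ [eDst c], st.2 + 1) else st) ([], cnt)).2 := by
  rw [aLoop]
  simp [hq]

-- A's first pass is exactly one round of its loop started on the queue [0]
theorem a_as_loop (conns : List (List Int)) :
    min_reorient_flight_routes 0 conns
      = (conns.length : Int) - aLoop conns (2 * conns.length + 3) [0] 0 := by
  have hfuel : 2 * conns.length + 3 = (2 * conns.length + 2) + 1 := by omega
  rw [hfuel, aLoop_succ_ne conns _ [0] 0 (by simp)]
  have hptw : (fun (st : List Int × Int) c =>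
      if [(0 : Int)].contains (eSrc c) then (st.1 ++ [eDst c], st.2 + 1) else st)
      = (fun (st : List Int × Int) c =>
      if eSrc c == 0 then (st.1 ++ [eDst c], st.2 + 1) else st) := by
    funext st c
    have hcont : [(0 : Int)].contains (eSrc c) = (eSrc c == 0) := by
      by_cases h : eSrc c = 0 <;> simp [h]
    rw [hcont]
  rw [min_reorient_flight_routes]
  simp only [hptw]

theorem n_irrelevant (n : Int) (conns : List (List Int)) :
    min_reorient_flight_routes n conns = min_reorient_flight_routes 0 conns := rfl

theorem n_irrelevant_alt (n : Int) (conns : List (List Int)) :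
    min_reorient_flight_routes_alt n conns = min_reorient_flight_routes_alt 0 conns := rfl

-- ===== VERDICT (by name: the statement is the Claim_ definition above) =====
theorem min_reorient_flight_routes_spec : Claim_equal_min_reorient_flight_routes := by
  intro n conns _ _
  unfold Spec_min_reorient_flight_routes
  rw [n_irrelevant, n_irrelevant_alt, a_as_loop]
  rw [min_reorient_flight_routes_alt]
  have hset : PySem.Set.add PySem.Set.empty (0 : Int) = [0] := rfl
  rw [hset]
  rw [loop_eq conns (2 * conns.length + 3) [0] [0] 0 (fun x => Iff.rfl) (by simp)]
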